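-- pv_equiv track=rewrite | github.com/Tufalabs/TextbooksToRL | lib/question_generator/generator.py | extract_boxed_expression
-- ===== SOURCE A (Python) =====
-- def extract_boxed_expression(latex_str: str) -> str:
--     """
--     Extract the expression inside the \boxed{...} command, handling nested braces.
--     If not found, returns the entire string.
--     """
--     latex_str = latex_str.strip()
--
--     if "\\boxed{" not in latex_str:
--         return latex_str.strip()
--
--     start_idx = latex_str.index("\\boxed{") + 7  # len("\\boxed{")
--     brace_count = 1
--     end_idx = start_idx
--
--     while brace_count > 0 and end_idx < len(latex_str):
--         if latex_str[end_idx] == '{':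
--             brace_count += 1
--         elif latex_str[end_idx] == '}':
--             brace_count -= 1
--         end_idx += 1
--
--     if brace_count == 0:
--         return latex_str[start_idx:end_idx-1].strip()
--     return latex_str.strip()
-- ===== SOURCE B (Python) =====
-- def extract_boxed_expression(latex_str: str) -> str:
--     """
--     Extract the expression inside \boxed{...}, handling nested braces.
--     Delimiter-jumping scan: instead of inspecting every character, jump
--     between successive '{' / '}' positions with str.find.
--     """
--     s = latex_str.strip()
--     start = s.find("\\boxed{")
--     if start == -1:
--         return s
--     pos = start + 7
--     depth = 1
--     while True:
--         close_i = s.find('}', pos)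
--         if close_i == -1:
--             return s
--         open_i = s.find('{', pos)
--         if open_i != -1 and open_i < close_i:
--             depth += 1
--             pos = open_i + 1
--         else:
--             depth -= 1
--             if depth == 0:
--                 return s[start + 7:close_i].strip()
--             pos = close_i + 1
-- ===== Notes on version B (the rewrite author's own statement) =====
-- stated objective: alternative
-- what changed: The char-by-char depth-counting while loop over every character is replaced by a delimiter-jumping scan that uses str.find to hop directly between successive opening/closing brace positions (and the in/index preamble by a single find), so only brace positions are visited.
import Mathlib
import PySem

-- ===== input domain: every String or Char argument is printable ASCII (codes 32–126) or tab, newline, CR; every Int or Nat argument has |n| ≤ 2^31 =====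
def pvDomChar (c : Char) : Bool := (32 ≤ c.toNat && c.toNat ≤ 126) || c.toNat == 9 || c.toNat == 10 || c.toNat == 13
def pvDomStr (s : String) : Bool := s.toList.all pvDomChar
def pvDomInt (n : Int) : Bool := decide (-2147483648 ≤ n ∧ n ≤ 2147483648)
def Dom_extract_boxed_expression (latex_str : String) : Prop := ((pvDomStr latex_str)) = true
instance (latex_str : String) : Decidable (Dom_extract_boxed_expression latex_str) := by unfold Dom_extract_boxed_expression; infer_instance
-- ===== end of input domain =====

-- B replaces A's char-by-char depth loop by a delimiter-jumping scan via find; same return value, proved equal on all inputs.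

-- ===== PORT A =====
-- A's while loop: state (brace_count, end_idx); iterating end_idx over positions = structural recursion on the remaining characters.
def pvALoop : List Char → Int → Int → Int × Int
  | [], bc, i => (bc, i)
  | c :: rest, bc, i =>
    if bc > 0 then
      pvALoop rest (if c = '{' then bc + 1 else if c = '}' then bc - 1 else bc) (i + 1)
    else (bc, i)

def extract_boxed_expression (latex_str : String) : String :=
  let cs := PySem.Chars.strip latex_str.toList
  if PySem.Chars.isIn "\\boxed{".toList cs = false then
    String.ofList (PySem.Chars.strip cs)
  else
    let start_idx : Int := PySem.Chars.find cs "\\boxed{".toList + 7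
    let r := pvALoop (PySem.List.slice cs (some start_idx) none) 1 start_idx
    if r.1 = 0 then
      String.ofList (PySem.Chars.strip (PySem.List.slice cs (some start_idx) (some (r.2 - 1))))
    else
      String.ofList (PySem.Chars.strip cs)

-- ===== PORT B =====
-- B's 'while True' jump loop; pos strictly increases and stays ≤ len, so fuel = len + 1 suffices (fuel only makes it total).
def pvBLoop (cs : List Char) (inner_start : Int) : Nat → Int → Int → String
  | 0, _, _ => String.ofList cs
  | fuel + 1, pos, depth =>
    let close_i := PySem.Chars.findFrom cs ['}'] pos none
    if close_i = -1 then String.ofList cs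
    else
      let open_i := PySem.Chars.findFrom cs ['{'] pos none
      if open_i ≠ -1 ∧ open_i < close_i then
        pvBLoop cs inner_start fuel (open_i + 1) (depth + 1)
      else
        if depth - 1 = 0 then
          String.ofList (PySem.Chars.strip (PySem.List.slice cs (some inner_start) (some close_i)))
        else
          pvBLoop cs inner_start fuel (close_i + 1) (depth - 1)

def extract_boxed_expression_alt (latex_str : String) : String :=
  let cs := PySem.Chars.strip latex_str.toList
  let start := PySem.Chars.find cs "\\boxed{".toList
  if start = -1 then String.ofList cs
  else pvBLoop cs (start + 7) (cs.length + 1) (start + 7) 1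

-- ===== PRECONDITION & SPEC =====
def Spec_extract_boxed_expression (latex_str : String) (out : String) : Prop := out = extract_boxed_expression_alt latex_str
instance (latex_str : String) (out : String) : Decidable (Spec_extract_boxed_expression latex_str out) := by unfold Spec_extract_boxed_expression; infer_instance

-- ===== CLAIM (what is proved, stated in full; the proofs are below) =====
def Claim_equal_extract_boxed_expression : Prop := ∀ (latex_str : String), Dom_extract_boxed_expression latex_str → Spec_extract_boxed_expression latex_str (extract_boxed_expression latex_str)

-- ===== LEMMAS AND PROOFS =====

theorem pv_dropWhile_idem {α : Type} (p : α → Bool) (l : List α) :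
    List.dropWhile p (List.dropWhile p l) = List.dropWhile p l := by
  induction l with
  | nil => simp
  | cons a l ih =>
    by_cases h : p a = true
    · simpa [List.dropWhile, h] using ih
    · simp [List.dropWhile, h]

theorem pv_strip_idem (l : List Char) :
    PySem.Chars.strip (PySem.Chars.strip l) = PySem.Chars.strip l := by
  have hdw : List.dropWhile PySem.Chars.isspace (PySem.Chars.lstrip l) = PySem.Chars.lstrip l :=
    pv_dropWhile_idem _ _
  have hpre : PySem.Chars.rstrip (PySem.Chars.lstrip l) <+: PySem.Chars.lstrip l := by
    rw [← List.reverse_suffix]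
    simp only [PySem.Chars.rstrip, List.reverse_reverse]
    exact List.dropWhile_suffix _
  have h1 : PySem.Chars.lstrip (PySem.Chars.rstrip (PySem.Chars.lstrip l)) =
      PySem.Chars.rstrip (PySem.Chars.lstrip l) := by
    cases hz : PySem.Chars.rstrip (PySem.Chars.lstrip l) with
    | nil => simp [PySem.Chars.lstrip]
    | cons b t =>
      rw [hz] at hpre
      obtain ⟨r, hr⟩ := hpre
      by_cases hb : PySem.Chars.isspace b = true
      · exfalso
        rw [← hr, List.cons_append, List.dropWhile_cons, if_pos hb] at hdw
        have := List.length_dropWhile_le PySem.Chars.isspace (t ++ r)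
        rw [hdw] at this
        simp at this
      · simp [PySem.Chars.lstrip, hb]
  have h2 : PySem.Chars.rstrip (PySem.Chars.rstrip (PySem.Chars.lstrip l)) =
      PySem.Chars.rstrip (PySem.Chars.lstrip l) := by
    simp only [PySem.Chars.rstrip, List.reverse_reverse]
    rw [pv_dropWhile_idem]
  simp only [PySem.Chars.strip]
  rw [h1, h2]

-- skip a run of non-brace characters: brace_count stays bc
theorem pvALoop_skip (u v : List Char) (bc i : Int)
    (hu : ∀ x ∈ u, x ≠ '{' ∧ x ≠ '}') (hbc : 0 < bc) :
    pvALoop (u ++ v) bc i = pvALoop v bc (i + u.length) := by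
  induction u generalizing i with
  | nil => simp
  | cons c u ih =>
    have hc := hu c (by simp)
    have : pvALoop (c :: (u ++ v)) bc i = pvALoop (u ++ v) bc (i + 1) := by
      simp [pvALoop, hbc, hc.1, hc.2]
    rw [List.cons_append, this, ih (i + 1) (fun x hx => hu x (List.mem_cons_of_mem _ hx))]
    congr 1
    simp
    ring

-- if no '}' remains, brace_count never reaches 0
theorem pvALoop_pos (t : List Char) (bc i : Int)
    (hbc : 0 < bc) (ht : '}' ∉ t) : 0 < (pvALoop t bc i).1 := by
  induction t generalizing bc i with
  | nil => simpa [pvALoop] using hbc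
  | cons c t ih =>
    have hc : c ≠ '}' := fun h => ht (by simp [h])
    have ht' : '}' ∉ t := fun h => ht (by simp [h])
    by_cases h : c = '{'
    · simpa [pvALoop, hbc, h] using ih (bc + 1) (i + 1) (by omega) ht'
    · simpa [pvALoop, hbc, h, hc] using ih bc (i + 1) hbc ht'

-- singleton prefix ↔ the indexed character
theorem pv_singleton_prefix (a : Char) (l : List Char) (k : Nat) :
    ([a] <+: l.drop k) ↔ l[k]? = some a := by
  rw [← List.head?_drop]
  generalize l.drop k = m
  cases m with
  | nil => simp
  | cons b t => simp [List.cons_prefix_cons, eq_comm]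

-- characterisation of find for a single character
theorem pv_find_char (t : List Char) (a : Char) (n : Nat)
    (h : PySem.Chars.find t [a] = (n : Int)) :
    t[n]? = some a ∧ ∀ j < n, t[j]? ≠ some a := by
  have h0 : 0 ≤ PySem.Chars.find t [a] := by rw [h]; positivity
  obtain ⟨h1, h2⟩ := PySem.Chars.find_spec h0
  rw [h, Int.toNat_natCast] at h1 h2
  exact ⟨(pv_singleton_prefix a t n).mp h1,
    fun j hj hja => h2 j hj ((pv_singleton_prefix a t j).mpr hja)⟩

theorem pvALoop_zero (t : List Char) (i : Int) : pvALoop t 0 i = (0, i) := by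
  cases t <;> simp [pvALoop]

-- advance A's loop to just past the first brace character (position k; no brace before k)
theorem pvALoop_step (t : List Char) (k : Nat) (hk : k < t.length)
    (hnb : ∀ j, j < k → t[j]? ≠ some '{' ∧ t[j]? ≠ some '}') (d i : Int) (hd : 0 < d) :
    pvALoop t d i =
      pvALoop (t.drop (k + 1))
        (if t[k] = '{' then d + 1 else if t[k] = '}' then d - 1 else d) (i + k + 1) := by
  conv_lhs => rw [← List.take_append_drop k t, ← List.getElem_cons_drop hk]
  rw [pvALoop_skip _ _ _ _ ?_ hd]
  · have hlen : (t.take k).length = k := by simp [List.length_take]; omega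
    rw [hlen]
    simp only [pvALoop, if_pos hd]
  · intro x hx
    obtain ⟨j, hj, hx⟩ := List.mem_iff_getElem.mp hx
    have hjk : j < k := by simp [List.length_take] at hj; omega
    have hjt : j < t.length := by omega
    have hx' : x = t[j] := by rw [← hx, List.getElem_take]
    have hget : t[j]? = some t[j] := List.getElem?_eq_getElem hjt
    refine ⟨fun he => (hnb j hjk).1 ?_, fun he => (hnb j hjk).2 ?_⟩
    · rw [hget, ← hx', he]
    · rw [hget, ← hx', he]

-- main loop correspondence
theorem pv_main (cs : List Char) (si : Int) (hcs : PySem.Chars.strip cs = cs) :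
    ∀ (fuel : Nat) (pos : Nat) (depth : Int), 1 ≤ depth → pos ≤ cs.length →
      cs.length - pos < fuel →
      (if (pvALoop (cs.drop pos) depth (pos : Int)).1 = 0 then
         String.ofList (PySem.Chars.strip (PySem.List.slice cs (some si)
           (some ((pvALoop (cs.drop pos) depth (pos : Int)).2 - 1))))
       else String.ofList (PySem.Chars.strip cs)) =
      pvBLoop cs si fuel (pos : Int) depth := by
  intro fuel
  induction fuel with
  | zero => intro pos depth _ _ hf; omega
  | succ fuel ih =>
    intro pos depth hd hpos hf
    simp only [pvBLoop]
    rw [PySem.Chars.findFrom_natCast cs ['}'] pos hpos,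
        PySem.Chars.findFrom_natCast cs ['{'] pos hpos]
    by_cases hc : PySem.Chars.find (List.drop pos cs) ['}'] = -1
    · -- no closing brace left: A's brace_count never reaches 0, both return the stripped string
      have hmem : '}' ∉ cs.drop pos := by
        rw [← List.singleton_infix_iff]
        exact (PySem.Chars.find_eq_neg_one_iff _ _).mp hc
      have hbc := pvALoop_pos (cs.drop pos) depth (pos : Int) (by omega) hmem
      rw [if_neg (by omega), if_pos (by rw [hc]; simp), hcs]
    · have h0 : 0 ≤ PySem.Chars.find (cs.drop pos) ['}'] := by
        have := PySem.Chars.neg_one_le_find (cs.drop pos) ['}']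
        omega
      obtain ⟨n, hn⟩ : ∃ n : Nat, PySem.Chars.find (cs.drop pos) ['}'] = (n : Int) :=
        ⟨_, (Int.toNat_of_nonneg h0).symm⟩
      obtain ⟨htn, hmin⟩ := pv_find_char (cs.drop pos) '}' n hn
      have hnlt : n < (cs.drop pos).length := (List.getElem?_eq_some_iff.mp htn).1
      have htlen : (cs.drop pos).length = cs.length - pos := List.length_drop
      have hclose : (if PySem.Chars.find (List.drop pos cs) ['}'] = -1 then (-1 : Int)
          else ↑pos + PySem.Chars.find (List.drop pos cs) ['}']) = ↑pos + ↑n := by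
        rw [if_neg hc, hn]
      have hcne : ¬((pos : Int) + (n : Int) = -1) := by omega
      by_cases hoc : PySem.Chars.find (cs.drop pos) ['{'] ≠ -1 ∧
          PySem.Chars.find (cs.drop pos) ['{'] < (n : Int)
      · -- next delimiter is '{': depth increases
        have ho0 : 0 ≤ PySem.Chars.find (cs.drop pos) ['{'] := by
          have := PySem.Chars.neg_one_le_find (cs.drop pos) ['{']
          omega
        obtain ⟨m, hm⟩ : ∃ m : Nat, PySem.Chars.find (cs.drop pos) ['{'] = (m : Int) :=
          ⟨_, (Int.toNat_of_nonneg ho0).symm⟩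
        have hmn : m < n := by rw [hm] at hoc; exact_mod_cast hoc.2
        obtain ⟨htm, hmin'⟩ := pv_find_char (cs.drop pos) '{' m hm
        have hmlt : m < (cs.drop pos).length := by omega
        have hgm : (cs.drop pos)[m] = '{' := by
          have := List.getElem?_eq_getElem hmlt
          rw [this] at htm; exact (Option.some.injEq _ _).mp htm
        have hstep := pvALoop_step (cs.drop pos) m hmlt
          (fun j hj => ⟨hmin' j hj, hmin j (by omega)⟩) depth (pos : Int) (by omega)
        rw [hgm, if_pos rfl] at hstep
        have hocond : (if PySem.Chars.find (cs.drop pos) ['{'] = -1 then (-1 : Int)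
            else ↑pos + PySem.Chars.find (cs.drop pos) ['{']) = ↑pos + ↑m := by
          rw [if_neg hoc.1, hm]
        have hbcond : ((pos : Int) + (m : Int) ≠ -1) ∧
            ((pos : Int) + (m : Int) < (pos : Int) + (n : Int)) := ⟨by omega, by omega⟩
        conv_rhs => rw [hclose, if_neg hcne, hocond, if_pos hbcond]
        have hdrop : (cs.drop pos).drop (m + 1) = cs.drop (pos + m + 1) := by
          rw [List.drop_drop]; ring_nf
        rw [hdrop] at hstep
        rw [hstep]
        have hih := ih (pos + m + 1) (depth + 1) (by omega) (by omega) (by omega)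
        push_cast at hih
        exact hih
      · -- next delimiter is '}': depth decreases
        have hnoopen : ∀ j, j < n → (cs.drop pos)[j]? ≠ some '{' := by
          intro j hj
          by_cases ho : PySem.Chars.find (cs.drop pos) ['{'] = -1
          · have : '{' ∉ cs.drop pos := by
              rw [← List.singleton_infix_iff]
              exact (PySem.Chars.find_eq_neg_one_iff _ _).mp ho
            intro hsome
            exact this (List.mem_of_getElem? hsome)
          · have ho0 : 0 ≤ PySem.Chars.find (cs.drop pos) ['{'] := by
              have := PySem.Chars.neg_one_le_find (cs.drop pos) ['{']
              omega
            obtain ⟨m, hm⟩ : ∃ m : Nat, PySem.Chars.find (cs.drop pos) ['{'] = (m : Int) :=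
              ⟨_, (Int.toNat_of_nonneg ho0).symm⟩
            have hnm : n ≤ m := by
              have hno : ¬ PySem.Chars.find (cs.drop pos) ['{'] < (n : Int) := by
                intro hlt; exact hoc ⟨by rw [hm]; omega, hlt⟩
              rw [hm] at hno; omega
            exact (pv_find_char (cs.drop pos) '{' m hm).2 j (by omega)
        have hgn : (cs.drop pos)[n] = '}' := by
          have := List.getElem?_eq_getElem hnlt
          rw [this] at htn; exact (Option.some.injEq _ _).mp htn
        have hstep := pvALoop_step (cs.drop pos) n hnlt
          (fun j hj => ⟨hnoopen j hj, hmin j hj⟩) depth (pos : Int) (by omega)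
        rw [hgn, if_neg (by decide), if_pos rfl] at hstep
        have hdrop : (cs.drop pos).drop (n + 1) = cs.drop (pos + n + 1) := by
          rw [List.drop_drop]; ring_nf
        rw [hdrop] at hstep
        have hnocond : ¬(((if PySem.Chars.find (cs.drop pos) ['{'] = -1 then (-1 : Int)
            else ↑pos + PySem.Chars.find (cs.drop pos) ['{']) ≠ -1) ∧
            ((if PySem.Chars.find (cs.drop pos) ['{'] = -1 then (-1 : Int)
            else ↑pos + PySem.Chars.find (cs.drop pos) ['{']) < ↑pos + ↑n)) := by
          by_cases ho : PySem.Chars.find (cs.drop pos) ['{'] = -1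
          · simp [ho]
          · rw [if_neg ho]
            rintro ⟨_, h2⟩
            have := PySem.Chars.neg_one_le_find (cs.drop pos) ['{']
            exact hoc ⟨ho, by omega⟩
        by_cases hd1 : depth = 1
        · subst hd1
          conv_rhs => rw [hclose, if_neg hcne, if_neg hnocond,
            if_pos (show (1 : Int) - 1 = 0 by norm_num)]
          rw [hstep]
          norm_num
          rw [pvALoop_zero]
          norm_num
        · conv_rhs => rw [hclose, if_neg hcne, if_neg hnocond,
            if_neg (show ¬(depth - 1 = 0) by omega)]
          rw [hstep]
          have hih := ih (pos + n + 1) (depth - 1) (by omega) (by omega) (by omega)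
          push_cast at hih
          exact hih

-- ===== VERDICT (by name: the statement is the Claim_ definition above) =====
theorem extract_boxed_expression_spec : Claim_equal_extract_boxed_expression := by
  unfold Claim_equal_extract_boxed_expression Spec_extract_boxed_expression
  intro ls _
  unfold extract_boxed_expression extract_boxed_expression_alt
  simp only []
  have hcs : PySem.Chars.strip (PySem.Chars.strip ls.toList) = PySem.Chars.strip ls.toList :=
    pv_strip_idem ls.toList
  by_cases hf : PySem.Chars.find (PySem.Chars.strip ls.toList) "\\boxed{".toList = -1
  · have hii : PySem.Chars.isIn "\\boxed{".toList (PySem.Chars.strip ls.toList) = false :=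
      (PySem.Chars.isIn_eq_false_iff _ _).mpr ((PySem.Chars.find_eq_neg_one_iff _ _).mp hf)
    rw [if_pos hii, if_pos hf, hcs]
  · have hin : ¬ (PySem.Chars.isIn "\\boxed{".toList (PySem.Chars.strip ls.toList) = false) := by
      rw [PySem.Chars.isIn_eq_false_iff]
      intro hni
      exact hf ((PySem.Chars.find_eq_neg_one_iff _ _).mpr hni)
    rw [if_neg hin, if_neg hf]
    have h0 : 0 ≤ PySem.Chars.find (PySem.Chars.strip ls.toList) "\\boxed{".toList := by
      have := PySem.Chars.neg_one_le_find (PySem.Chars.strip ls.toList) "\\boxed{".toList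
      omega
    obtain ⟨n, hn⟩ : ∃ n : Nat,
        PySem.Chars.find (PySem.Chars.strip ls.toList) "\\boxed{".toList = (n : Int) :=
      ⟨_, (Int.toNat_of_nonneg h0).symm⟩
    have hsp := (PySem.Chars.find_spec h0).1
    rw [hn, Int.toNat_natCast] at hsp
    have h7 : n + 7 ≤ (PySem.Chars.strip ls.toList).length := by
      have hle := hsp.length_le
      simp [List.length_drop] at hle
      omega
    have hsl : PySem.List.slice (PySem.Chars.strip ls.toList) (some ((n : Int) + 7)) none =
        (PySem.Chars.strip ls.toList).drop (n + 7) := by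
      rw [PySem.List.slice_from _ (by omega)]
      congr 1
    have hmain := pv_main (PySem.Chars.strip ls.toList) ((n : Int) + 7) hcs
      ((PySem.Chars.strip ls.toList).length + 1) (n + 7) 1 (le_refl 1) h7 (by omega)
    push_cast at hmain
    rw [hn, hsl]
    exact hmain
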